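-- pv_equiv track=rewrite | github.com/AmarjeetMohanty/Cryptography | adfgx cipher encryption.py | encrypt_adfgx_cipher
-- ===== SOURCE A (Python) =====
-- import math
--
-- def encrypt_adfgx_cipher(key,polybius,plaintext):
--     key = key.upper()
--     polybius = polybius.upper()
--     plaintext = plaintext.upper()
--     arr1 = ['A','D','F','G','X']
--     arr2 =  []
--     for i in range(len(key)):
--         arr2.append(key[i])
--     matrix= [["" for x in range(5)] for y in range(5)]
--     r = 0
--     c = 0
--     for i in range(len(polybius)):
--         matrix[r][c] = polybius[i]
--         if c==4:
--             r = r+1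
--             c=0
--         else:
--             c=c+1
--
--     ciphertext1 = []
--     i = 0
--     while i in range(len(plaintext)):
--        r = 0
--        c = 0
--        while r<=4 and c<=4:
--         if plaintext[i]==matrix[r][c]:
--             ciphertext1.append(arr1[r])
--             ciphertext1.append(arr1[c])
--             if c==4:
--                 r = r+1
--                 c = -1
--             c= c+1
--
--         else:
--             if c==4:
--                 r = r+1
--                 c = -1
--             c= c+1
--        i+=1
--
--     matrix2 = [["" for x in range(len(key))] for y in range(math.ceil(len(ciphertext1)/len(key)))]
--     transposeMatrix = [["" for x in range(math.ceil(len(ciphertext1)/len(key)))] for y in range(len(key))]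
--     r = 0
--     c = 0
--     for i in range(len(ciphertext1)):
--         matrix2[r][c] = ciphertext1[i]
--         if c==len(key)-1:
--             r = r+1
--             c=0
--         else:
--             c=c+1
--
--     for i in range(len(matrix2)):
--    # iterate through columns
--       for j in range(len(matrix2[0])):
--         transposeMatrix[j][i] = matrix2[i][j]
--     # list(map(int, transposeMatrix))
--     indices = [i for i, _ in sorted(enumerate(arr2), key=lambda x: x[1])]
--     ciphertextMatrix = []
--     r = 0
--     c = 0
--     while r in range(len(key)) and c in range(math.ceil(len(ciphertext1)/len(key))):
--         ciphertextMatrix.append(transposeMatrix[indices[r]][c])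
--         c = c+1
--         if c==math.ceil(len(ciphertext1)/len(key)):
--             r =r+1
--             c = 0
--     return ciphertextMatrix
-- ===== SOURCE B (Python) =====
-- import math
--
-- def encrypt_adfgx_cipher(key, polybius, plaintext):
--     key = key.upper()
--     polybius = polybius.upper()
--     plaintext = plaintext.upper()
--     labels = 'ADFGX'
--     # Build once: grid character -> all its label pairs (one per occurrence, in grid order).
--     table = {}
--     for idx, ch in enumerate(polybius):
--         table.setdefault(ch, []).extend((labels[idx // 5], labels[idx % 5]))
--     pairs = []
--     for ch in plaintext:
--         pairs.extend(table.get(ch, []))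
--     k = len(key)
--     rows = math.ceil(len(pairs) / k)
--     # Deal the pair symbols round-robin into k column buckets, pad each to full height.
--     cols = [[] for _ in range(k)]
--     for i, ch in enumerate(pairs):
--         cols[i % k].append(ch)
--     for col in cols:
--         col.extend([''] * (rows - len(col)))
--     out = []
--     for j in sorted(range(k), key=lambda j: key[j]):
--         out.extend(cols[j])
--     return out
-- ===== Notes on version B (the rewrite author's own statement) =====
-- stated objective: alternative
-- what changed: B builds a dictionary from grid character to its label pairs once so the per-plaintext-character scan of the 25 grid cells disappears, and replaces the matrix-build-plus-transpose-plus-walk of stage 2 by dealing the symbols round-robin into k column buckets that are padded and emitted in key-sorted order.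
import Mathlib
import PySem

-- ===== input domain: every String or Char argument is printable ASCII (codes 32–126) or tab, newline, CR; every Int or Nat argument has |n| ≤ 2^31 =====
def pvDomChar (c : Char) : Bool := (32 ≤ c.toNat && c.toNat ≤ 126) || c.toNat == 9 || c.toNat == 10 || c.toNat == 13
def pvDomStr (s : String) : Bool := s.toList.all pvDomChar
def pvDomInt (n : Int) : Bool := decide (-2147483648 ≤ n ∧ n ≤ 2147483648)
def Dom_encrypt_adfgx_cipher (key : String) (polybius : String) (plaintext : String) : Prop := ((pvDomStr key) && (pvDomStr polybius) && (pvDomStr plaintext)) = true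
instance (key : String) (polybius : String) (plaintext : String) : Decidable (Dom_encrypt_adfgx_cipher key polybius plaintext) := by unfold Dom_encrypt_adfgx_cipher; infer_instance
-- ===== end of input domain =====

-- B replaces A's repeated 5x5 grid scan by a dict from grid char to its label pairs built
-- once, and A's matrix-build + transpose + walk by dealing the symbols round-robin into k
-- column buckets emitted in key-sorted order (objective: alternative; same output).
-- 1-char Python strings (grid cells, key letters) are ported as Char (empty cell = none);
-- ordering of single ASCII chars coincides with Python's string order, so sort keys agree.

-- ===== PORT A =====
-- shared 2-d list helpers: matrix[r][c] read / write (Python raises out of range: outside Pre_)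
def pvGet2 {α : Type} (m : List (List α)) (r c : Nat) (d : α) : α := (m.getD r []).getD c d
def pvSet2 {α : Type} (m : List (List α)) (r c : Nat) (v : α) : List (List α) :=
  m.set r ((m.getD r []).set c v)

def pvArr1 : List String := ["A", "D", "F", "G", "X"]

-- the row-major fill loop A uses twice: 'm[r][c] = xs[i]; if c == w-1: r += 1; c = 0 else c += 1'
def pvStep {α : Type} (w : Nat) (s : List (List α) × Nat × Nat) (x : α) : List (List α) × Nat × Nat :=
  let m := pvSet2 s.1 s.2.1 s.2.2 x
  if s.2.2 = w - 1 then (m, s.2.1 + 1, 0) else (m, s.2.1, s.2.2 + 1)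
def pvFillRM {α : Type} (w : Nat) (xs : List α) (m0 : List (List α)) : List (List α) :=
  (xs.foldl (pvStep w) (m0, 0, 0)).1

-- A's inner 'while r<=4 and c<=4' scan for one plaintext character
def pvScan (m : List (List (Option Char))) (ch : Char) (r c : Nat) (acc : List String) : List String :=
  if h : r ≤ 4 ∧ c ≤ 4 then
    let acc' := if some ch == pvGet2 m r c none then acc ++ [pvArr1.getD r "", pvArr1.getD c ""] else acc
    if hc : c = 4 then pvScan m ch (r + 1) 0 acc' else pvScan m ch r (c + 1) acc'
  else acc
termination_by (5 - r) * 5 + (4 - c)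
decreasing_by all_goals omega

-- A's final 'while r in range(len(key)) and c in range(rows)' loop
-- (indices entries come from enumerate, hence are nonnegative: .toNat is exact)
def pvOut (t : List (List String)) (indices : List Int) (k rows : Nat) (r c : Nat) (acc : List String) : List String :=
  if h : r < k ∧ c < rows then
    let acc' := acc ++ [pvGet2 t (indices.getD r 0).toNat c ""]
    if hc : c + 1 = rows then pvOut t indices k rows (r + 1) 0 acc'
    else pvOut t indices k rows r (c + 1) acc'
  else acc
termination_by (k - r, rows - c)
decreasing_by all_goals (simp_wf; omega)

def encrypt_adfgx_cipher (key : String) (polybius : String) (plaintext : String) : List String :=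
  let keyU := (PySem.Str.upper key).toList
  let polyU := (PySem.Str.upper polybius).toList
  let ptU := (PySem.Str.upper plaintext).toList
  let arr2 := keyU
  let matrix := pvFillRM 5 (polyU.map some) (List.replicate 5 (List.replicate 5 (none : Option Char)))
  let ct := ptU.foldl (fun acc ch => pvScan matrix ch 0 0 acc) []
  let k := keyU.length
  -- math.ceil(len(ciphertext1)/len(key)): exact for k > 0 (k = 0 raises ZeroDivisionError, outside Pre_)
  let rows := (ct.length + k - 1) / k
  let m2 := pvFillRM k ct (List.replicate rows (List.replicate k ""))
  let t := (List.range rows).foldl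
    (fun t i => (List.range k).foldl (fun t j => pvSet2 t j i (pvGet2 m2 i j "")) t)
    (List.replicate k (List.replicate rows ""))
  let indices := (PySem.List.sorted (PySem.List.enumerate arr2 0) (fun p => p.2) false).map (fun p => p.1)
  pvOut t indices k rows 0 0 []

-- ===== PORT B =====
def pvLabels : List String := ["A", "D", "F", "G", "X"]   -- labels = 'ADFGX', indexed character by character

-- (labels[idx // 5], labels[idx % 5]), the two symbols grid position idx contributes
def pvPair (i : Int) : List String := [pvLabels.getD (i.toNat / 5) "", pvLabels.getD (i.toNat % 5) ""]

-- cols[i % k].append(ch) for one enumerated pair (i, ch)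
def pvColsStep (k : Nat) (cs : List (List String)) (p : Int × String) : List (List String) :=
  cs.set (p.1.toNat % k) ((cs.getD (p.1.toNat % k) []) ++ [p.2])

def encrypt_adfgx_cipher_alt (key : String) (polybius : String) (plaintext : String) : List String :=
  let keyU := (PySem.Str.upper key).toList
  let polyU := (PySem.Str.upper polybius).toList
  let ptU := (PySem.Str.upper plaintext).toList
  -- table.setdefault(ch, []).extend((labels[idx//5], labels[idx%5]))
  let table := (PySem.List.enumerate polyU 0).foldl
    (fun d p => d.modify p.2 [] (· ++ pvPair p.1)) (PySem.Dict.empty : PySem.Dict Char (List String))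
  let pairs := ptU.foldl (fun acc ch => acc ++ table.getD ch []) []
  let k := keyU.length
  -- math.ceil(len(pairs)/k): exact for k > 0 (k = 0 raises ZeroDivisionError, outside Pre_)
  let rows := (pairs.length + k - 1) / k
  let cols := (PySem.List.enumerate pairs 0).foldl (pvColsStep k) (List.replicate k ([] : List String))
  let cols2 := cols.map (fun col => col ++ List.replicate (rows - col.length) "")
  let order := PySem.List.sorted (PySem.List.pyRange 0 (k : Int) 1) (fun j => PySem.List.pyGetD keyU j ' ') false
  order.foldl (fun acc j => acc ++ cols2.getD j.toNat []) []

-- ===== PRECONDITION & SPEC =====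
-- Pre_ excludes exactly the inputs where A raises: an empty key (ZeroDivisionError in
-- math.ceil(len/0)) and a polybius string longer than the 5x5 grid (IndexError).
def Pre_encrypt_adfgx_cipher (key : String) (polybius : String) (plaintext : String) : Prop :=
  key.toList ≠ [] ∧ polybius.toList.length ≤ 25
instance (key : String) (polybius : String) (plaintext : String) : Decidable (Pre_encrypt_adfgx_cipher key polybius plaintext) := by unfold Pre_encrypt_adfgx_cipher; infer_instance

def pvWitness_encrypt_adfgx_cipher : String × String × String := ("KEY", "ABCDEFGHIKLMNOPQRSTUVWXYZ", "HELLO")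

def Spec_encrypt_adfgx_cipher (key : String) (polybius : String) (plaintext : String) (out : List String) : Prop := out = encrypt_adfgx_cipher_alt key polybius plaintext
instance (key : String) (polybius : String) (plaintext : String) (out : List String) : Decidable (Spec_encrypt_adfgx_cipher key polybius plaintext out) := by unfold Spec_encrypt_adfgx_cipher; infer_instance

-- ===== CLAIM (what is proved, stated in full; the proofs are below) =====
def Claim_equal_encrypt_adfgx_cipher : Prop := ∀ (key : String) (polybius : String) (plaintext : String), Dom_encrypt_adfgx_cipher key polybius plaintext → Pre_encrypt_adfgx_cipher key polybius plaintext → Spec_encrypt_adfgx_cipher key polybius plaintext (encrypt_adfgx_cipher key polybius plaintext)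

-- ===== LEMMAS AND PROOFS =====

lemma pvLen_set2 {α : Type} (m : List (List α)) (r c : Nat) (v : α) :
    (pvSet2 m r c v).length = m.length := by simp [pvSet2]

lemma pvRow_set2 {α : Type} {m : List (List α)} {w : Nat} (hw : ∀ row ∈ m, row.length = w)
    (r c : Nat) (v : α) : ∀ row ∈ pvSet2 m r c v, row.length = w := by
  intro row hrow
  by_cases hr : r < m.length
  · rcases List.mem_or_eq_of_mem_set hrow with h | h
    · exact hw _ h
    · subst h
      rw [List.length_set, List.getD_eq_getElem m [] hr]
      exact hw _ (List.getElem_mem hr)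
  · rw [pvSet2, List.set_eq_of_length_le (by omega)] at hrow
    exact hw _ hrow

lemma pvGet2_set2 {α : Type} (m : List (List α)) {r c : Nat} (v d : α)
    (hr : r < m.length) (hc : c < (m.getD r []).length) (r' c' : Nat) :
    pvGet2 (pvSet2 m r c v) r' c' d = if r' = r ∧ c' = c then v else pvGet2 m r' c' d := by
  unfold pvGet2 pvSet2
  by_cases h1 : r' = r
  · subst h1
    rw [List.getD_eq_getElem _ _ (show r' < (m.set r' ((m.getD r' []).set c v)).length by
      simpa using hr), List.getElem_set_self]
    by_cases h2 : c' = c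
    · subst h2
      rw [if_pos ⟨rfl, rfl⟩, List.getD_eq_getElem _ _ (show c' < ((m.getD r' []).set c' v).length by
        simpa using hc), List.getElem_set_self]
    · rw [if_neg (by simp [h2])]
      simp only [List.getD_eq_getElem?_getD]
      rw [List.getElem?_set_ne (by omega : c ≠ c')]
  · rw [if_neg (by simp [h1])]
    simp only [List.getD_eq_getElem?_getD]
    rw [List.getElem?_set_ne (by omega : r ≠ r')]

lemma pvGet2_replicate {α : Type} (a b : Nat) (v : α) (r c : Nat) :
    pvGet2 (List.replicate a (List.replicate b v)) r c v = v := by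
  unfold pvGet2
  simp only [List.getD_eq_getElem?_getD, List.getElem?_replicate]
  split_ifs <;> simp

lemma pv_dm1 {w p : Nat} (hw : 0 < w) (h : p % w = w - 1) :
    (p + 1) / w = p / w + 1 ∧ (p + 1) % w = 0 := by
  have h0 := Nat.div_add_mod p w
  have he : p + 1 = w * (p / w + 1) := by rw [Nat.mul_add, Nat.mul_one]; omega
  rw [he]
  exact ⟨Nat.mul_div_cancel_left _ hw, Nat.mul_mod_right _ _⟩

lemma pv_dm2 {w p : Nat} (hw : 0 < w) (h : p % w ≠ w - 1) :
    (p + 1) / w = p / w ∧ (p + 1) % w = p % w + 1 := by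
  have hm : p % w < w := Nat.mod_lt _ hw
  have h1 : p % w + 1 < w := by omega
  have h0 := Nat.div_add_mod p w
  have he : p + 1 = w * (p / w) + (p % w + 1) := by omega
  rw [he, Nat.mul_add_div hw, Nat.mul_add_mod]
  exact ⟨by rw [Nat.div_eq_of_lt h1]; omega, Nat.mod_eq_of_lt h1⟩

lemma pv_pos_dm {w r c : Nat} (hw : 0 < w) (hc : c < w) :
    (r * w + c) / w = r ∧ (r * w + c) % w = c := by
  rw [show r * w + c = w * r + c from by ring, Nat.mul_add_div hw, Nat.mul_add_mod]
  exact ⟨by rw [Nat.div_eq_of_lt hc]; omega, Nat.mod_eq_of_lt hc⟩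

lemma pvFill_go {α : Type} (w R : Nat) (hw : 0 < w) (d : α) :
    ∀ (xs : List α) (m : List (List α)) (p : Nat),
      m.length = R → (∀ row ∈ m, row.length = w) → p + xs.length ≤ R * w →
      ((xs.foldl (pvStep w) (m, p / w, p % w)).1.length = R ∧
       (∀ row ∈ (xs.foldl (pvStep w) (m, p / w, p % w)).1, row.length = w) ∧
       ∀ r c, c < w →
         pvGet2 (xs.foldl (pvStep w) (m, p / w, p % w)).1 r c d =
           if p ≤ r * w + c ∧ r * w + c < p + xs.length
           then xs.getD (r * w + c - p) d else pvGet2 m r c d) := by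
  intro xs
  induction xs with
  | nil =>
    intro m p hR hrow _
    refine ⟨hR, hrow, ?_⟩
    intro r c hc
    simp only [List.foldl_nil]
    have hfalse : ¬ (p ≤ r * w + c ∧ r * w + c < p + List.length ([] : List α)) := by
      simp only [List.length_nil]; omega
    rw [if_neg hfalse]
  | cons x xs ih =>
    intro m p hR hrow hb
    have hpR : p < R * w := by simp at hb; omega
    have hdiv : p / w < R := (Nat.div_lt_iff_lt_mul hw).mpr (by omega)
    have hrowlen : (m.getD (p / w) []).length = w := by
      rw [List.getD_eq_getElem _ _ (by omega)]
      exact hrow _ (List.getElem_mem (by omega))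
    have hmod : p % w < w := Nat.mod_lt _ hw
    have hstep : pvStep w (m, p / w, p % w) x =
        (pvSet2 m (p / w) (p % w) x, (p + 1) / w, (p + 1) % w) := by
      unfold pvStep
      by_cases hcase : p % w = w - 1
      · rcases pv_dm1 hw hcase with ⟨e1, e2⟩; simp [hcase, e1, e2]
      · rcases pv_dm2 hw hcase with ⟨e1, e2⟩; simp [hcase, e1, e2]
    have hR' : (pvSet2 m (p / w) (p % w) x).length = R := by rw [pvLen_set2]; exact hR
    have hrow' := pvRow_set2 hrow (p / w) (p % w) x
    have hb' : (p + 1) + xs.length ≤ R * w := by simp at hb; omega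
    have IH := ih (pvSet2 m (p / w) (p % w) x) (p + 1) hR' hrow' hb'
    rw [List.foldl_cons, hstep]
    refine ⟨IH.1, IH.2.1, ?_⟩
    intro r c hc
    rw [IH.2.2 r c hc,
        pvGet2_set2 m x d (by rw [hR]; exact hdiv) (by rw [hrowlen]; exact hmod) r c]
    rcases pv_pos_dm (r := r) hw hc with ⟨hd, hm⟩
    have hiff : (r = p / w ∧ c = p % w) ↔ r * w + c = p := by
      constructor
      · rintro ⟨rfl, rfl⟩; exact Nat.div_add_mod' p w
      · intro he; rw [← he]; exact ⟨hd.symm, hm.symm⟩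
    by_cases h1 : p + 1 ≤ r * w + c ∧ r * w + c < p + 1 + xs.length
    · have htrue : p ≤ r * w + c ∧ r * w + c < p + (x :: xs).length := by
        simp only [List.length_cons]; omega
      rw [if_pos h1, if_pos htrue]
      have : r * w + c - p = (r * w + c - (p + 1)) + 1 := by omega
      rw [this, List.getD_cons_succ]
    · rw [if_neg h1]
      by_cases h2 : r = p / w ∧ c = p % w
      · have hep : r * w + c = p := hiff.mp h2
        rw [if_pos h2, if_pos (by simp only [hep, List.length_cons]; omega)]
        simp [hep]
      · rw [if_neg h2]
        have hne : r * w + c ≠ p := fun he => h2 (hiff.mpr he)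
        have : ¬ (p ≤ r * w + c ∧ r * w + c < p + (x :: xs).length) := by
          simp only [List.length_cons]; omega
        rw [if_neg this]

-- corollary of pvFill_go at p = 0 with an all-d initial matrix
lemma pvFillRM_spec {α : Type} (w R : Nat) (hw : 0 < w) (d : α) (xs : List α)
    (hlen : xs.length ≤ R * w) :
    (pvFillRM w xs (List.replicate R (List.replicate w d))).length = R ∧
    (∀ row ∈ pvFillRM w xs (List.replicate R (List.replicate w d)), row.length = w) ∧
    ∀ r c, c < w →
      pvGet2 (pvFillRM w xs (List.replicate R (List.replicate w d))) r c d =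
        if r * w + c < xs.length then xs.getD (r * w + c) d else d := by
  have h := pvFill_go w R hw d xs (List.replicate R (List.replicate w d)) 0
    (by simp) (by intro row hr; exact (List.eq_of_mem_replicate hr) ▸ List.length_replicate)
    (by omega)
  rw [Nat.zero_div, Nat.zero_mod] at h
  unfold pvFillRM
  refine ⟨h.1, h.2.1, ?_⟩
  intro r c hc
  rw [h.2.2 r c hc, pvGet2_replicate]
  have : (0 ≤ r * w + c ∧ r * w + c < 0 + xs.length) ↔ r * w + c < xs.length := by omega
  by_cases hcase : r * w + c < xs.length
  · rw [if_pos (this.mpr hcase), if_pos hcase]; simp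
  · rw [if_neg (fun hh => hcase (this.mp hh)), if_neg hcase]

lemma pv_getD_append_replicate {α : Type} (l : List α) (pad : Nat) (d : α) (pos : Nat) :
    (l ++ List.replicate pad d).getD pos d = if pos < l.length then l.getD pos d else d := by
  rcases Nat.lt_or_ge pos l.length with h | h
  · rw [if_pos h]
    simp [List.getD_eq_getElem?_getD, List.getElem?_append_left h]
  · rw [if_neg (by omega)]
    simp only [List.getD_eq_getElem?_getD, List.getElem?_append_right h, List.getElem?_replicate]
    split_ifs <;> simp

-- one plaintext character: A's 5×5 scan is the flatMap over the enumerated flat grid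
lemma pvScan_end (g : List (Option Char)) (m : List (List (Option Char))) (ch : Char)
    (hg : g.length = 25) (acc : List String) :
    pvScan m ch 5 0 acc = acc ++ ((PySem.List.enumerate g 0).drop 25).flatMap
      (fun q => if some ch == q.2 then pvPair q.1 else []) := by
  rw [pvScan, dif_neg (by omega), List.drop_of_length_le (by rw [PySem.List.length_enumerate]; omega)]
  simp

lemma pvScan_spec (g : List (Option Char)) (m : List (List (Option Char))) (ch : Char)
    (hg : g.length = 25)
    (Hm : ∀ r c, c < 5 → pvGet2 m r c none = g.getD (r * 5 + c) none) :
    ∀ (n p r c : Nat) (acc : List String), 25 - p ≤ n → r = p / 5 → c = p % 5 → p ≤ 25 →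
      pvScan m ch r c acc = acc ++ ((PySem.List.enumerate g 0).drop p).flatMap
        (fun q => if some ch == q.2 then pvPair q.1 else []) := by
  intro n
  induction n with
  | zero =>
    intro p r c acc hn hr hc hp
    have hp25 : p = 25 := by omega
    subst hp25
    have hr5 : r = 5 := by omega
    have hc0 : c = 0 := by omega
    subst hr5; subst hc0
    exact pvScan_end g m ch hg acc
  | succ n ih =>
    intro p r c acc hn hr hc hp
    by_cases hp25 : p = 25
    · subst hp25
      have hr5 : r = 5 := by omega
      have hc0 : c = 0 := by omega
      subst hr5; subst hc0
      exact pvScan_end g m ch hg acc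
    · have hplt : p < 25 := by omega
      have hcell : pvGet2 m r c none = g.getD p none := by
        rw [Hm r c (by omega)]; congr 1; omega
      have hdrop : (PySem.List.enumerate g 0).drop p =
          ((p : Int), g.getD p none) :: (PySem.List.enumerate g 0).drop (p + 1) := by
        rw [← List.getElem_cons_drop (show p < (PySem.List.enumerate g 0).length by
          rw [PySem.List.length_enumerate]; omega)]
        congr 1
        rw [PySem.List.getElem_enumerate]
        simp [List.getD_eq_getElem?_getD, List.getElem?_eq_getElem (show p < g.length by omega)]
      rw [pvScan, dif_pos (by omega), hdrop]
      simp only [List.flatMap_cons]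
      rw [hcell]
      by_cases hmatch : (some ch == g.getD p none) = true
      · rw [if_pos hmatch, if_pos hmatch]
        by_cases hc4 : c = 4
        · rw [dif_pos hc4, ih (p + 1) (r + 1) 0 _ (by omega) (by omega) (by omega) (by omega)]
          simp [pvPair]
          constructor <;> simp [pvArr1, pvLabels, hr, hc]
        · rw [dif_neg hc4, ih (p + 1) r (c + 1) _ (by omega) (by omega) (by omega) (by omega)]
          simp [pvPair]
          constructor <;> simp [pvArr1, pvLabels, hr, hc]
      · rw [if_neg hmatch, if_neg hmatch]
        by_cases hc4 : c = 4
        · rw [dif_pos hc4, ih (p + 1) (r + 1) 0 _ (by omega) (by omega) (by omega) (by omega)]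
          simp
        · rw [dif_neg hc4, ih (p + 1) r (c + 1) _ (by omega) (by omega) (by omega) (by omega)]
          simp

-- inner transpose loop (fixed source row i): sets t[j][i] := m2[i][j] for j < nj
lemma pvTrans_inner (m2 : List (List String)) (rows k : Nat) (i : Nat) (hi : i < rows) :
    ∀ (nj : Nat) (t : List (List String)), nj ≤ k → t.length = k → (∀ row ∈ t, row.length = rows) →
      (((List.range nj).foldl (fun t j => pvSet2 t j i (pvGet2 m2 i j "")) t).length = k ∧
       (∀ row ∈ (List.range nj).foldl (fun t j => pvSet2 t j i (pvGet2 m2 i j "")) t, row.length = rows) ∧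
       ∀ j' i', pvGet2 ((List.range nj).foldl (fun t j => pvSet2 t j i (pvGet2 m2 i j "")) t) j' i' "" =
         if j' < nj ∧ i' = i then pvGet2 m2 i' j' "" else pvGet2 t j' i' "") := by
  intro nj
  induction nj with
  | zero =>
    intro t hnj htl htr
    refine ⟨htl, htr, ?_⟩
    intro j' i'
    simp
  | succ nj ih =>
    intro t hnj htl htr
    rcases ih t (by omega) htl htr with ⟨ihl, ihr, ihg⟩
    rw [List.range_succ, List.foldl_append, List.foldl_cons, List.foldl_nil]
    have hrowlen : ((((List.range nj).foldl (fun t j => pvSet2 t j i (pvGet2 m2 i j "")) t)).getD nj []).length = rows := by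
      rw [List.getD_eq_getElem _ _ (by omega)]
      exact ihr _ (List.getElem_mem (by omega))
    refine ⟨by rw [pvLen_set2]; exact ihl, pvRow_set2 ihr _ _ _, ?_⟩
    intro j' i'
    rw [pvGet2_set2 _ _ _ (by omega) (by rw [hrowlen]; omega) j' i', ihg j' i']
    by_cases h1 : j' = nj ∧ i' = i
    · rw [if_pos h1, if_pos ⟨by omega, h1.2⟩]
      rw [h1.1, h1.2]
    · rw [if_neg h1]
      by_cases h2 : j' < nj ∧ i' = i
      · rw [if_pos h2, if_pos ⟨by omega, h2.2⟩]
      · have hneg : ¬(j' < nj + 1 ∧ i' = i) := by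
          rintro ⟨ha, hb⟩
          rcases Nat.lt_or_ge j' nj with hlt | hge
          · exact h2 ⟨hlt, hb⟩
          · exact h1 ⟨by omega, hb⟩
        rw [if_neg h2, if_neg hneg]

-- outer transpose loop over source rows
lemma pvTrans_outer (m2 : List (List String)) (rows k : Nat) :
    ∀ (ni : Nat) (t : List (List String)), ni ≤ rows → t.length = k → (∀ row ∈ t, row.length = rows) →
      (((List.range ni).foldl (fun t i => (List.range k).foldl (fun t j => pvSet2 t j i (pvGet2 m2 i j "")) t) t).length = k ∧
       (∀ row ∈ (List.range ni).foldl (fun t i => (List.range k).foldl (fun t j => pvSet2 t j i (pvGet2 m2 i j "")) t) t, row.length = rows) ∧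
       ∀ j' i', pvGet2 ((List.range ni).foldl (fun t i => (List.range k).foldl (fun t j => pvSet2 t j i (pvGet2 m2 i j "")) t) t) j' i' "" =
         if j' < k ∧ i' < ni then pvGet2 m2 i' j' "" else pvGet2 t j' i' "") := by
  intro ni
  induction ni with
  | zero =>
    intro t hni htl htr
    refine ⟨htl, htr, ?_⟩
    intro j' i'
    simp
  | succ ni ih =>
    intro t hni htl htr
    rcases ih t (by omega) htl htr with ⟨ihl, ihr, ihg⟩
    rw [List.range_succ, List.foldl_append, List.foldl_cons, List.foldl_nil]
    rcases pvTrans_inner m2 rows k ni (by omega) k _ (le_refl k) ihl ihr with ⟨il, irr, ig⟩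
    refine ⟨il, irr, ?_⟩
    intro j' i'
    rw [ig j' i', ihg j' i']
    by_cases h1 : j' < k ∧ i' = ni
    · rw [if_pos h1, if_pos ⟨h1.1, by omega⟩, h1.2]
    · rw [if_neg h1]
      by_cases h2 : j' < k ∧ i' < ni
      · rw [if_pos h2, if_pos ⟨h2.1, by omega⟩]
      · have hneg : ¬(j' < k ∧ i' < ni + 1) := by
          rintro ⟨ha, hb⟩
          rcases Nat.lt_or_ge i' ni with hlt | hge
          · exact h2 ⟨ha, hlt⟩
          · exact h1 ⟨ha, by omega⟩
        rw [if_neg h2, if_neg hneg]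

-- A's output loop, assuming every visited cell evaluates through fcol
lemma pvOut_spec (t : List (List String)) (indices : List Int) (k rows : Nat)
    (fcol : Int → Nat → String) (hrows : 0 < rows) (hlen : indices.length = k)
    (hcell : ∀ r, r < k → ∀ c, c < rows →
      pvGet2 t (indices.getD r 0).toNat c "" = fcol (indices.getD r 0) c) :
    ∀ (n1 : Nat) (r : Nat), k - r ≤ n1 → ∀ (n2 c : Nat) (acc : List String), rows - c ≤ n2 → c < rows →
      pvOut t indices k rows r c acc =
        acc ++ (if r < k then
          ((List.range rows).drop c).map (fcol (indices.getD r 0)) ++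
            (indices.drop (r + 1)).flatMap (fun col => (List.range rows).map (fcol col))
          else []) := by
  intro n1
  induction n1 with
  | zero =>
    intro r hn1 n2 c acc hn2 hc
    rw [pvOut, dif_neg (by omega), if_neg (by omega)]
    simp
  | succ n1 ih1 =>
    intro r hn1
    by_cases hrk : r < k
    · intro n2
      induction n2 with
      | zero => intro c acc hn2 hc; omega
      | succ n2 ih2 =>
        intro c acc hn2 hc
        rw [pvOut, dif_pos ⟨hrk, hc⟩]
        have hdropc : (List.range rows).drop c = c :: (List.range rows).drop (c + 1) := by
          rw [← List.getElem_cons_drop (show c < (List.range rows).length by simpa using hc)]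
          simp
        rw [if_pos hrk, hdropc]
        by_cases hc1 : c + 1 = rows
        · rw [dif_pos hc1, ih1 (r + 1) (by omega) rows 0 _ (by omega) (by omega)]
          rw [hcell r hrk c hc]
          have hdrop2 : (List.range rows).drop (c + 1) = [] :=
            List.drop_of_length_le (by simp; omega)
          rw [hdrop2]
          by_cases hr1 : r + 1 < k
          · rw [if_pos hr1]
            have hri : indices.drop (r + 1) = indices.getD (r + 1) 0 :: indices.drop (r + 2) := by
              rw [← List.getElem_cons_drop (show r + 1 < indices.length by omega),
                List.getD_eq_getElem _ _ (by omega)]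
            rw [hri]
            simp
          · rw [if_neg hr1]
            have hri : indices.drop (r + 1) = [] := List.drop_of_length_le (by omega)
            rw [hri]
            simp
        · rw [dif_neg hc1, ih2 (c + 1) _ (by omega) (by omega), if_pos hrk]
          rw [hcell r hrk c hc]
          simp
    · intro n2 c acc hn2 hc
      rw [pvOut, dif_neg (by omega), if_neg hrk]
      simp

lemma pv_insertBy_map {α β : Type} (q : β → β → Bool) (g : α → β) (x : α) :
    ∀ ys : List α, PySem.List.insertBy q (g x) (ys.map g) =
      (PySem.List.insertBy (fun a b => q (g a) (g b)) x ys).map g := by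
  intro ys
  induction ys with
  | nil => simp [PySem.List.insertBy]
  | cons y ys ih =>
    simp only [List.map_cons, PySem.List.insertBy]
    by_cases hq : q (g x) (g y)
    · simp [hq]
    · simp [hq, ih]

lemma pv_sorted_map_comm {α β κ : Type} [LT κ] [DecidableLT κ] (ys : List α) (g : α → β)
    (key : β → κ) :
    PySem.List.sorted (ys.map g) key = (PySem.List.sorted ys (fun a => key (g a))).map g := by
  rw [PySem.List.sorted_eq_foldl_insertBy, PySem.List.sorted_eq_foldl_insertBy, List.foldl_map]
  suffices h : ∀ (acc : List α),
      ys.foldl (fun acc' x => PySem.List.insertBy (fun a b => decide (key a < key b)) (g x) acc')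
        (acc.map g) =
      (ys.foldl (fun acc' x =>
        PySem.List.insertBy (fun a b => decide (key (g a) < key (g b))) x acc') acc).map g by
    simpa using h []
  induction ys with
  | nil => intro acc; simp
  | cons y ys ih =>
    intro acc
    simp only [List.foldl_cons]
    rw [pv_insertBy_map, ih]

lemma pv_indices_eq (keyU : List Char) :
    ((PySem.List.sorted (PySem.List.enumerate keyU 0) (fun p => p.2)).map (fun p => p.1)) =
      PySem.List.sorted (PySem.List.pyRange 0 (keyU.length : Int) 1)
        (fun j => PySem.List.pyGetD keyU j ' ') := by
  rw [show PySem.List.enumerate keyU 0 = (PySem.List.pyRange 0 (keyU.length : Int) 1).map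
      (fun j => (j, PySem.List.pyGetD keyU j ' ')) from by
    rw [PySem.List.enumerate_eq_map_pyRange keyU ' ', PySem.List.len_eq]]
  rw [pv_sorted_map_comm]
  rw [List.map_map]
  exact List.map_id _

lemma pv_ceil_le (n k : Nat) (hk : 0 < k) : n ≤ ((n + k - 1) / k) * k := by
  have h1 := Nat.div_add_mod (n + k - 1) k
  have h2 : (n + k - 1) % k < k := Nat.mod_lt _ hk
  rw [Nat.mul_comm] at h1
  omega

lemma pv_upper_len (s : String) : (PySem.Str.upper s).toList.length = s.toList.length := by
  simp [PySem.Str.toList_upper, PySem.Chars.upper]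

-- ===== B-side lemmas =====

-- grouping dict: looking up c after the build returns every pair contributed by cells holding c
lemma pvTable_getD (c : Char) :
    ∀ (l : List (Int × Char)) (d : PySem.Dict Char (List String)),
      (l.foldl (fun d p => d.modify p.2 [] (· ++ pvPair p.1)) d).getD c [] =
        d.getD c [] ++ l.flatMap (fun p => if p.2 == c then pvPair p.1 else []) := by
  intro l
  induction l with
  | nil => intro d; simp
  | cons x xs ih =>
    intro d
    rw [List.foldl_cons, ih, PySem.Dict.getD_modify, List.flatMap_cons]
    by_cases hx : x.2 = c
    · rw [if_pos hx.symm, if_pos (by simp [hx]), hx, List.append_assoc]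
    · rw [if_neg (fun he => hx he.symm), if_neg (by simp [hx])]
      simp

-- enumerate commutes with map on the values
lemma pv_enumerate_map {α β : Type} (f : α → β) (l : List α) (s : Int) :
    PySem.List.enumerate (l.map f) s = (PySem.List.enumerate l s).map (fun p => (p.1, f p.2)) := by
  induction l generalizing s with
  | nil => simp [PySem.List.enumerate_nil]
  | cons x xs ih => simp [PySem.List.enumerate_cons, ih]

-- B's table lookup for ch equals A's scan over the 25-cell flat grid g
lemma pv_table_eq_scan (polyU : List Char) (ch : Char) :
    ((PySem.List.enumerate polyU 0).foldl
        (fun d p => d.modify p.2 [] (· ++ pvPair p.1))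
        (PySem.Dict.empty : PySem.Dict Char (List String))).getD ch [] =
      (PySem.List.enumerate (polyU.map some ++ List.replicate (25 - polyU.length) (none : Option Char)) 0).flatMap
        (fun q => if some ch == q.2 then pvPair q.1 else []) := by
  rw [pvTable_getD ch, PySem.Dict.getD_empty, List.nil_append,
    PySem.List.enumerate_append, List.flatMap_append]
  have h2 : (PySem.List.enumerate (List.replicate (25 - polyU.length) (none : Option Char))
      (0 + (polyU.map some).length)).flatMap
        (fun q => if some ch == q.2 then pvPair q.1 else []) = [] := by
    apply List.flatMap_eq_nil_iff.mpr
    intro q hq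
    rcases (PySem.List.mem_enumerate_iff _ _ _).mp hq with ⟨i, hi, rfl⟩
    simp at hi ⊢
  rw [h2, List.append_nil, pv_enumerate_map, List.flatMap_map]
  congr 1
  funext p
  by_cases h : p.2 = ch
  · rw [if_pos (by simp [h]), if_pos (by simp [h])]
  · rw [if_neg (by simp [h]), if_neg (by simp; exact fun he => h he.symm)]

-- number of i < p with i % k = j (for j < k)
def pvCnt (k p j : Nat) : Nat := p / k + (if j < p % k then 1 else 0)

-- the round-robin dealing loop: bucket j holds exactly the symbols at positions ≡ j (mod k)
lemma pvCols_go (k : Nat) (hk : 0 < k) (full : List String) :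
    ∀ (xs : List String) (p : Nat) (cs : List (List String)),
      xs = full.drop p → p ≤ full.length → cs.length = k →
      (∀ j, j < k → cs.getD j [] = (List.range (pvCnt k p j)).map (fun r => full.getD (r * k + j) "")) →
      (((PySem.List.enumerate xs (p : Int)).foldl (pvColsStep k) cs).length = k ∧
       ∀ j, j < k → ((PySem.List.enumerate xs (p : Int)).foldl (pvColsStep k) cs).getD j [] =
         (List.range (pvCnt k full.length j)).map (fun r => full.getD (r * k + j) "")) := by
  intro xs
  induction xs with
  | nil =>
    intro p cs hxs hple hlen hinv
    have hpe : p = full.length := by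
      have hL := congrArg List.length hxs
      simp at hL
      omega
    subst hpe
    exact ⟨by simpa [PySem.List.enumerate_nil] using hlen,
      fun j hj => by simpa [PySem.List.enumerate_nil] using hinv j hj⟩
  | cons x xs ih =>
    intro p cs hxs hple hlen hinv
    have hplt : p < full.length := by
      by_contra hcon
      rw [List.drop_of_length_le (by omega)] at hxs
      exact (List.cons_ne_nil _ _) hxs
    rw [List.drop_eq_getElem_cons hplt] at hxs
    injection hxs with hx hxs'
    have hmk : p % k < k := Nat.mod_lt _ hk
    rw [PySem.List.enumerate_cons, List.foldl_cons]
    have hstep : pvColsStep k cs ((p : Int), x) = cs.set (p % k) (cs.getD (p % k) [] ++ [x]) := by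
      simp [pvColsStep]
    rw [hstep]
    have hlen' : (cs.set (p % k) (cs.getD (p % k) [] ++ [x])).length = k := by simp [hlen]
    have hinv' : ∀ j, j < k → (cs.set (p % k) (cs.getD (p % k) [] ++ [x])).getD j [] =
        (List.range (pvCnt k (p + 1) j)).map (fun r => full.getD (r * k + j) "") := by
      intro j hj
      by_cases hjp : j = p % k
      · rw [hjp]
        have hset : (cs.set (p % k) (cs.getD (p % k) [] ++ [x])).getD (p % k) [] =
            cs.getD (p % k) [] ++ [x] := by
          rw [List.getD_eq_getElem _ _ (by rw [List.length_set, hlen]; exact hmk),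
            List.getElem_set_self]
        have hc1 : pvCnt k (p + 1) (p % k) = pvCnt k p (p % k) + 1 := by
          unfold pvCnt
          by_cases hcase : p % k = k - 1
          · rcases pv_dm1 hk hcase with ⟨e1, e2⟩
            rw [e1, e2]
            split_ifs <;> omega
          · rcases pv_dm2 hk hcase with ⟨e1, e2⟩
            rw [e1, e2]
            split_ifs <;> omega
        have hc0 : pvCnt k p (p % k) = p / k := by unfold pvCnt; simp
        have hlast : full.getD (p / k * k + p % k) "" = x := by
          rw [Nat.div_add_mod' p k, List.getD_eq_getElem _ _ hplt]
          exact hx.symm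
        rw [hset, hinv _ hmk, hc1, hc0, List.range_succ, List.map_append]
        simp only [List.map_cons, List.map_nil]
        rw [hlast]
      · have hset : (cs.set (p % k) (cs.getD (p % k) [] ++ [x])).getD j [] = cs.getD j [] := by
          simp only [List.getD_eq_getElem?_getD]
          rw [List.getElem?_set_ne (fun he => hjp he.symm)]
        have hc2 : pvCnt k (p + 1) j = pvCnt k p j := by
          unfold pvCnt
          by_cases hcase : p % k = k - 1
          · rcases pv_dm1 hk hcase with ⟨e1, e2⟩
            rw [e1, e2]
            split_ifs <;> omega
          · rcases pv_dm2 hk hcase with ⟨e1, e2⟩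
            rw [e1, e2]
            split_ifs <;> omega
        rw [hset, hinv _ hj, hc2]
    have hres := ih (p + 1) _ hxs' (by omega) hlen' hinv'
    rw [show ((p : Int) + 1) = ((p + 1 : Nat) : Int) by push_cast; ring]
    exact hres

-- a bucket padded to full height reads the padded ciphertext column-wise
lemma pv_col_padded (k : Nat) (hk : 0 < k) (ct : List String) (j : Nat) (hj : j < k) :
    (List.range (pvCnt k ct.length j)).map (fun r => ct.getD (r * k + j) "") ++
      List.replicate ((ct.length + k - 1) / k - pvCnt k ct.length j) "" =
      (List.range ((ct.length + k - 1) / k)).map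
        (fun r => (ct ++ List.replicate (((ct.length + k - 1) / k) * k - ct.length) "").getD (r * k + j) "") := by
  have hdm : ct.length / k * k + ct.length % k = ct.length := Nat.div_add_mod' ct.length k
  have hm : ct.length % k < k := Nat.mod_lt _ hk
  have hrowsEq : (ct.length + k - 1) / k =
      ct.length / k + (if ct.length % k = 0 then 0 else 1) := by
    by_cases hm0 : ct.length % k = 0
    · rw [if_pos hm0, show ct.length + k - 1 = ct.length / k * k + (k - 1) from by omega,
        (pv_pos_dm hk (show k - 1 < k by omega)).1]
      omega
    · rw [if_neg hm0, show ct.length + k - 1 = (ct.length / k + 1) * k + (ct.length % k - 1) from by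
        have h2 : (ct.length / k + 1) * k = ct.length / k * k + k := by ring
        omega,
        (pv_pos_dm hk (show ct.length % k - 1 < k by omega)).1]
  have hcnt_le : pvCnt k ct.length j ≤ (ct.length + k - 1) / k := by
    unfold pvCnt
    rw [hrowsEq]
    split_ifs <;> omega
  have hlt : ∀ r, r < pvCnt k ct.length j → r * k + j < ct.length := by
    intro r hr
    unfold pvCnt at hr
    by_cases hjm : j < ct.length % k
    · rw [if_pos hjm] at hr
      have h2 : r * k ≤ ct.length / k * k := Nat.mul_le_mul_right _ (by omega)
      omega
    · rw [if_neg hjm] at hr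
      have h2 : (r + 1) * k ≤ ct.length / k * k := Nat.mul_le_mul_right _ (by omega)
      have h3 : (r + 1) * k = r * k + k := by ring
      omega
  have hge : ∀ r, pvCnt k ct.length j ≤ r → ct.length ≤ r * k + j := by
    intro r hr
    unfold pvCnt at hr
    by_cases hjm : j < ct.length % k
    · rw [if_pos hjm] at hr
      have h2 : (ct.length / k + 1) * k ≤ r * k := Nat.mul_le_mul_right _ (by omega)
      have h3 : (ct.length / k + 1) * k = ct.length / k * k + k := by ring
      omega
    · rw [if_neg hjm] at hr
      have h2 : ct.length / k * k ≤ r * k := Nat.mul_le_mul_right _ (by omega)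
      omega
  rw [show (ct.length + k - 1) / k =
      pvCnt k ct.length j + ((ct.length + k - 1) / k - pvCnt k ct.length j) from by omega,
    List.range_add, List.map_append]
  congr 1
  · apply List.map_congr_left
    intro r hr
    rw [List.mem_range] at hr
    rw [pv_getD_append_replicate, if_pos (hlt r hr)]
  · rw [Nat.add_sub_cancel_left]
    have hall : ∀ b ∈ (List.map (fun r => pvCnt k ct.length j + r)
        (List.range ((ct.length + k - 1) / k - pvCnt k ct.length j))).map
          (fun r => (ct ++ List.replicate ((pvCnt k ct.length j +
            ((ct.length + k - 1) / k - pvCnt k ct.length j)) * k - ct.length) "").getD (r * k + j) ""),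
        b = "" := by
      intro b hb
      rcases List.mem_map.mp hb with ⟨r, hr, rfl⟩
      rcases List.mem_map.mp hr with ⟨r', hr', rfl⟩
      rw [pv_getD_append_replicate, if_neg (by
        have := hge (pvCnt k ct.length j + r') (Nat.le_add_right _ _)
        omega)]
    have hrep := List.eq_replicate_of_mem hall
    simp only [List.length_map, List.length_range] at hrep
    exact hrep.symm

-- the padded bucket j is column j of A's padded row-major matrix
lemma pvColsFinal (k : Nat) (hk : 0 < k) (ct : List String) (j : Nat) (hj : j < k) :
    (((PySem.List.enumerate ct 0).foldl (pvColsStep k) (List.replicate k ([] : List String))).map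
        (fun col => col ++ List.replicate ((ct.length + k - 1) / k - col.length) "")).getD j [] =
      (List.range ((ct.length + k - 1) / k)).map
        (fun r => (ct ++ List.replicate (((ct.length + k - 1) / k) * k - ct.length) "").getD (r * k + j) "") := by
  have h0 := pvCols_go k hk ct ct 0 (List.replicate k ([] : List String)) (by simp) (by omega)
    (by simp) (fun j' hj' => by simp [pvCnt])
  simp only [Nat.cast_zero] at h0
  obtain ⟨hclen, hcget⟩ := h0
  have hjlt : j < ((PySem.List.enumerate ct 0).foldl (pvColsStep k)
      (List.replicate k ([] : List String))).length := by omega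
  rw [List.getD_eq_getElem _ _ (by simpa using hjlt), List.getElem_map,
    show ((PySem.List.enumerate ct 0).foldl (pvColsStep k)
        (List.replicate k ([] : List String)))[j] =
      (List.range (pvCnt k ct.length j)).map (fun r => ct.getD (r * k + j) "") from by
        rw [← List.getD_eq_getElem _ _ hjlt]; exact hcget j hj]
  simp only [List.length_map, List.length_range]
  exact pv_col_padded k hk ct j hj

lemma pv_flatMap_congr {α β : Type} {l : List α} {f g : α → List β}
    (h : ∀ x ∈ l, f x = g x) : l.flatMap f = l.flatMap g := by
  induction l with
  | nil => rfl
  | cons x xs ih =>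
    rw [List.flatMap_cons, List.flatMap_cons, h x (by simp),
      ih (fun y hy => h y (by simp [hy]))]

lemma pv_main (key polybius plaintext : String)
    (hk : key.toList ≠ []) (hp : polybius.toList.length ≤ 25) :
    encrypt_adfgx_cipher key polybius plaintext = encrypt_adfgx_cipher_alt key polybius plaintext := by
  simp only [encrypt_adfgx_cipher, encrypt_adfgx_cipher_alt]
  set keyU := (PySem.Str.upper key).toList with hkeyU
  set polyU := (PySem.Str.upper polybius).toList with hpolyU
  set ptU := (PySem.Str.upper plaintext).toList with hptU
  have hk0 : 0 < keyU.length := by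
    rw [hkeyU, pv_upper_len]
    exact List.length_pos_of_ne_nil hk
  have hp25 : polyU.length ≤ 25 := by rw [hpolyU, pv_upper_len]; exact hp
  set g : List (Option Char) := polyU.map some ++ List.replicate (25 - polyU.length) none with hgdef
  -- B's stage 1: the grouped dict lookups emit exactly A's grid-scan output
  have hpairs : ptU.foldl (fun acc ch => acc ++
      ((PySem.List.enumerate polyU 0).foldl (fun d p => d.modify p.2 [] (· ++ pvPair p.1))
        (PySem.Dict.empty : PySem.Dict Char (List String))).getD ch []) [] =
      ptU.flatMap (fun ch => (PySem.List.enumerate g 0).flatMap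
        (fun q => if some ch == q.2 then pvPair q.1 else [])) := by
    rw [PySem.List.foldl_append_eq_flatMap]
    simp only [List.nil_append]
    exact pv_flatMap_congr (fun ch _ => by rw [pv_table_eq_scan, ← hgdef])
  set matrixA := pvFillRM 5 (polyU.map some) (List.replicate 5 (List.replicate 5 (none : Option Char))) with hma
  have hglen : g.length = 25 := by rw [hgdef]; simp; omega
  obtain ⟨hml, hmr, hmg⟩ := pvFillRM_spec 5 5 (by norm_num) (none : Option Char) (polyU.map some)
    (by simpa using hp25)
  have Hm : ∀ r c, c < 5 → pvGet2 matrixA r c none = g.getD (r * 5 + c) none := by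
    intro r c hc
    rw [hma, hmg r c hc, hgdef, pv_getD_append_replicate]
  have hscan : ∀ (acc : List String) (ch : Char), pvScan matrixA ch 0 0 acc =
      acc ++ (PySem.List.enumerate g 0).flatMap (fun q => if some ch == q.2 then
        pvPair q.1 else []) := by
    intro acc ch
    rw [pvScan_spec g matrixA ch hglen Hm 25 0 0 0 acc (by omega) (by simp) (by simp) (by omega),
      List.drop_zero]
  have hct : ptU.foldl (fun acc ch => pvScan matrixA ch 0 0 acc) [] =
      ptU.flatMap (fun ch => (PySem.List.enumerate g 0).flatMap (fun q => if some ch == q.2 then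
        pvPair q.1 else [])) := by
    rw [PySem.List.foldl_congr_mem ptU _
      (fun acc ch => acc ++ (PySem.List.enumerate g 0).flatMap (fun q => if some ch == q.2 then
        pvPair q.1 else []))
      [] (by intro acc x _; exact hscan acc x)]
    rw [PySem.List.foldl_append_eq_flatMap]
    simp
  rw [hct, hpairs]
  set ct := ptU.flatMap (fun ch => (PySem.List.enumerate g 0).flatMap (fun q => if some ch == q.2 then
    pvPair q.1 else [])) with hctdef
  set k := keyU.length with hkdef
  set rows := (ct.length + k - 1) / k with hrowsdef
  have hnk : ct.length ≤ rows * k := pv_ceil_le _ _ hk0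
  obtain ⟨h2l, h2r, h2g⟩ := pvFillRM_spec k rows hk0 "" ct hnk
  set m2 := pvFillRM k ct (List.replicate rows (List.replicate k "")) with hm2
  set padded := ct ++ List.replicate (rows * k - ct.length) "" with hpad
  have hm2pad : ∀ r c, r < rows → c < k → pvGet2 m2 r c "" = padded.getD (r * k + c) "" := by
    intro r c hr hc
    rw [hm2, h2g r c hc, hpad, pv_getD_append_replicate]
  obtain ⟨htl, htr2, htg⟩ := pvTrans_outer m2 rows k rows
    (List.replicate k (List.replicate rows "")) (le_refl rows) (by simp)
    (by intro row hr; exact (List.eq_of_mem_replicate hr) ▸ List.length_replicate)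
  set tA := (List.range rows).foldl
    (fun t i => (List.range k).foldl (fun t j => pvSet2 t j i (pvGet2 m2 i j "")) t)
    (List.replicate k (List.replicate rows "")) with htA
  have ht : ∀ j c, j < k → c < rows → pvGet2 tA j c "" = pvGet2 m2 c j "" := by
    intro j c hj hc
    rw [htA, htg j c, if_pos ⟨hj, hc⟩]
  set order := PySem.List.sorted (PySem.List.pyRange 0 (k : Int) 1)
    (fun j => PySem.List.pyGetD keyU j ' ') false with hord
  rw [show (PySem.List.sorted (PySem.List.enumerate keyU 0) (fun p => p.2) false).map (fun p => p.1)
      = order from pv_indices_eq keyU]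
  have hordlen : order.length = k := by
    rw [hord, PySem.List.length_sorted, PySem.List.length_pyRange_one]
    simp
  have hordmem : ∀ j ∈ order, 0 ≤ j ∧ j < (k : Int) := by
    intro j hj
    rw [hord, PySem.List.mem_sorted, PySem.List.mem_pyRange_one] at hj
    exact hj
  -- B's stage 2: the padded buckets, read in key order, are A's transposed columns
  rw [PySem.List.foldl_append_eq_flatMap]
  have hBcols : order.flatMap (fun j =>
      (((PySem.List.enumerate ct 0).foldl (pvColsStep k) (List.replicate k ([] : List String))).map
        (fun col => col ++ List.replicate (rows - col.length) "")).getD j.toNat []) =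
      order.flatMap (fun col => (List.range rows).map
        (fun c => padded.getD (c * k + col.toNat) "")) := by
    apply pv_flatMap_congr
    intro x hx
    have hb := hordmem x hx
    have hxk : x.toNat < k := by omega
    have h := pvColsFinal k hk0 ct x.toNat hxk
    rw [← hrowsdef, ← hpad] at h
    exact h
  rw [List.nil_append, hBcols]
  have hcell : ∀ r, r < k → ∀ c, c < rows →
      pvGet2 tA (order.getD r 0).toNat c "" =
        padded.getD (c * k + (order.getD r 0).toNat) "" := by
    intro r hr c hc
    have hmem : order.getD r 0 ∈ order := by
      rw [List.getD_eq_getElem _ _ (by omega)]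
      exact List.getElem_mem _
    have hb := hordmem _ hmem
    have hjk : (order.getD r 0).toNat < k := by omega
    rw [ht _ _ hjk hc, hm2pad c _ hc hjk]
  rcases Nat.eq_zero_or_pos rows with hr0 | hrpos
  · rw [pvOut, dif_neg (by omega)]
    rw [hr0]
    simp
  · rw [pvOut_spec tA order k rows
      (fun col c => padded.getD (c * k + col.toNat) "") hrpos hordlen hcell
      k 0 (by omega) rows 0 [] (by omega) hrpos]
    rw [if_pos hk0, List.drop_zero]
    have hcons : order = order.getD 0 0 :: order.drop 1 := by
      have h1 := List.getElem_cons_drop (show 0 < order.length by omega)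
      rw [List.getD_eq_getElem _ _ (by omega)]
      exact (h1.trans List.drop_zero).symm
    conv_rhs => rw [hcons]
    rw [List.flatMap_cons]
    simp

-- ===== VERDICT (by name: the statement is the Claim_ definition above) =====
theorem encrypt_adfgx_cipher_spec : Claim_equal_encrypt_adfgx_cipher := by
  intro key polybius plaintext _ hpre
  exact pv_main key polybius plaintext hpre.1 hpre.2
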